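-- pv_equiv track=rewrite | github.com/care101/LintCode | Python/array/flipAndInvertImage.py | flipReverse
-- ===== SOURCE A (Python) =====
-- def flipReverse(a):
--     p, q = 0, len(a)-1
--     while p < q:
--         temp = a[p] ^ 1
--         a[p] = a[q] ^ 1
--         a[q] = temp
--         p, q = p+1, q-1
--     if p == q:
--         a[p] ^= 1
--     return a
-- ===== SOURCE B (Python) =====
-- def flipReverse(a):
--     a[:] = [bit ^ 1 for bit in reversed(a)]
--     return a
-- ===== Notes on version B (the rewrite author's own statement) =====
-- stated objective: simpler
-- what changed: Replaces the half-length two-pointer swap-with-temp loop plus the odd-middle xor branch with one uniform full-length pass that rebuilds the list as the reversed bit-inverted sequence, written back via slice assignment to keep the in-place mutation.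
import Mathlib
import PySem

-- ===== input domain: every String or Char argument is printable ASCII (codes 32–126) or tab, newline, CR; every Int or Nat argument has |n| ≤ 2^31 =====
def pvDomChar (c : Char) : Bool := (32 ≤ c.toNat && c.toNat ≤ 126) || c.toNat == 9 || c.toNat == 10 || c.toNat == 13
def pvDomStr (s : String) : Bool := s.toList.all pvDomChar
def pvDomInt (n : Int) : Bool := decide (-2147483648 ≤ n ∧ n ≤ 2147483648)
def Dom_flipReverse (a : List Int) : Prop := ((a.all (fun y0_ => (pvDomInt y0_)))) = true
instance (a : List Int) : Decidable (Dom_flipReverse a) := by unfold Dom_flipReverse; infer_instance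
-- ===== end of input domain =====

-- B rebuilds the list as the reversed bit-inverted sequence in one uniform pass, replacing A's
-- two-pointer swap loop and its odd-middle branch; both Pythons mutate the argument in place to
-- the same final content, and the equivalence proved here is about the returned value.

-- ===== PORT A =====
-- the while loop: state is the current list contents plus the two cursors p, q
def flipReverseLoop (xs : List Int) (p q : Int) : List Int :=
  if p < q then
    -- temp = a[p] ^ 1; a[p] = a[q] ^ 1; a[q] = temp  (both indices are in range whenever reached)
    let temp := PySem.Int.bxor ((PySem.List.pyGet? xs p).getD 0) 1
    let c1 := xs.set p.natAbs (PySem.Int.bxor ((PySem.List.pyGet? xs q).getD 0) 1)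
    let c2 := c1.set q.natAbs temp
    flipReverseLoop c2 (p + 1) (q - 1)
  else if p == q then
    xs.set p.natAbs (PySem.Int.bxor ((PySem.List.pyGet? xs p).getD 0) 1)
  else xs
termination_by (q + 1 - p).toNat
decreasing_by omega

def flipReverse (a : List Int) : List Int :=
  flipReverseLoop a 0 ((a.length : Int) - 1)

-- ===== PORT B =====
def flipReverse_alt (a : List Int) : List Int :=
  a.reverse.map (fun bit => PySem.Int.bxor bit 1)

-- ===== PRECONDITION & SPEC =====
def Spec_flipReverse (a : List Int) (out : List Int) : Prop := out = flipReverse_alt a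
instance (a : List Int) (out : List Int) : Decidable (Spec_flipReverse a out) := by unfold Spec_flipReverse; infer_instance

-- ===== CLAIM (what is proved, stated in full; the proofs are below) =====
def Claim_equal_flipReverse : Prop := ∀ (a : List Int), Dom_flipReverse a → Spec_flipReverse a (flipReverse a)

-- ===== LEMMAS AND PROOFS =====

theorem pyGet?_some_of_bounds (xs : List Int) (p : Int) (hp : 0 ≤ p) (hlt : p.natAbs < xs.length) :
    PySem.List.pyGet? xs p = some xs[p.natAbs] := by
  have h : p = ((p.natAbs : Nat) : Int) := by omega
  conv_lhs => rw [h]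
  rw [PySem.List.pyGet?_natCast, List.getElem?_eq_getElem hlt]

theorem flipReverseLoop_getElem? (xs : List Int) (p q : Int)
    (hp : 0 ≤ p) (hq : q < (xs.length : Int)) (i : Nat) :
    (flipReverseLoop xs p q)[i]? =
      if p ≤ (i : Int) ∧ (i : Int) ≤ q then
        (xs[(p + q - i).toNat]?).map (fun x => PySem.Int.bxor x 1)
      else xs[i]? := by
  rw [flipReverseLoop]
  split
  · next hlt =>
    have hplen : p.natAbs < xs.length := by omega
    have hqlen : q.natAbs < xs.length := by omega
    have hgp := pyGet?_some_of_bounds xs p hp hplen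
    have hgq := pyGet?_some_of_bounds xs q (by omega) hqlen
    rw [flipReverseLoop_getElem? _ _ _ (by omega) (by simpa using by omega)]
    simp only [hgp, hgq, Option.getD_some]
    by_cases hi1 : (i : Int) = p
    · have hip : i = p.natAbs := by omega
      rw [if_neg (by omega), if_pos (by constructor <;> omega), hip,
        List.getElem?_set_ne (by omega), List.getElem?_set_self (by simpa using hplen)]
      have h2 : (p + q - ((p.natAbs : Nat) : Int)).toNat = q.natAbs := by omega
      rw [h2, List.getElem?_eq_getElem hqlen]
      rfl
    · by_cases hi2 : (i : Int) = q
      · have hiq : i = q.natAbs := by omega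
        rw [if_neg (by omega), if_pos (by constructor <;> omega), hiq,
          List.getElem?_set_self (by simpa using hqlen)]
        have h2 : (p + q - ((q.natAbs : Nat) : Int)).toNat = p.natAbs := by omega
        rw [h2, List.getElem?_eq_getElem hplen]
        rfl
      · by_cases hin : p + 1 ≤ (i : Int) ∧ (i : Int) ≤ q - 1
        · rw [if_pos hin, if_pos (by constructor <;> omega)]
          have h1 : p + 1 + (q - 1) - i = p + q - i := by ring
          rw [h1, List.getElem?_set_ne (by omega), List.getElem?_set_ne (by omega)]
        · rw [if_neg hin, if_neg (by omega),
            List.getElem?_set_ne (by omega), List.getElem?_set_ne (by omega)]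
  · next hge =>
    split
    · next heq =>
      have hpq : p = q := by simpa using heq
      subst hpq
      by_cases hi : (i : Int) = p
      · have hplen : p.natAbs < xs.length := by omega
        have hip : i = p.natAbs := by omega
        rw [if_pos (by constructor <;> omega), hip, List.getElem?_set_self (by omega),
          pyGet?_some_of_bounds xs p hp hplen]
        have h2 : (p + p - ((p.natAbs : Nat) : Int)).toNat = p.natAbs := by omega
        rw [h2, List.getElem?_eq_getElem hplen]
        rfl
      · rw [if_neg (by omega), List.getElem?_set_ne (by omega)]
    · next hne =>
      have : ¬ (p ≤ (i : Int) ∧ (i : Int) ≤ q) := by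
        simp only [beq_iff_eq] at hne; omega
      rw [if_neg this]
termination_by (q + 1 - p).toNat
decreasing_by omega

-- ===== VERDICT (by name: the statement is the Claim_ definition above) =====
theorem flipReverse_spec : Claim_equal_flipReverse := by
  intro a _
  show flipReverse a = flipReverse_alt a
  unfold flipReverse flipReverse_alt
  apply List.ext_getElem?
  intro i
  rw [flipReverseLoop_getElem? a 0 ((a.length : Int) - 1) (by omega) (by omega) i,
    List.getElem?_map]
  by_cases hi : i < a.length
  · rw [if_pos (by constructor <;> omega)]
    have h1 : (0 + ((a.length : Int) - 1) - i).toNat = a.length - 1 - i := by omega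
    rw [h1, List.getElem?_reverse hi]
  · rw [if_neg (by omega), List.getElem?_eq_none (by omega),
      List.getElem?_eq_none (by simpa using by omega)]
    rfl
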